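-- pv_equiv track=rewrite | github.com/jelmer/build-farm | buildfarm/build.py | revision_from_log
-- ===== SOURCE A (Python) =====
-- class MissingRevisionInfo(Exception):
--     """Revision info could not be found in the build log."""
--
--     def __init__(self, build=None):
--         self.build = build
--
-- def revision_from_log(log):
--     revid = None
--     for l in log:
--         if l.startswith("BUILD COMMIT REVISION: "):
--             revid = l.split(":", 1)[1].strip()
--     if revid is None:
--         raise MissingRevisionInfo()
--     return revid
-- ===== SOURCE B (Python) =====
-- class MissingRevisionInfo(Exception):
--     """Revision info could not be found in the build log."""
--
--     def __init__(self, build=None):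
--         self.build = build
--
--
-- def revision_from_log(log):
--     # Scan from the end; the first match from the back is the last match overall.
--     for l in reversed(list(log)):
--         if l.startswith("BUILD COMMIT REVISION: "):
--             return l.split(":", 1)[1].strip()
--     raise MissingRevisionInfo()
-- ===== Notes on version B (the rewrite author's own statement) =====
-- stated objective: alternative
-- what changed: Replaces A's forward scan that keeps overwriting the last matching revision with a reverse early-exit scan that returns at the first match from the back.
import Mathlib
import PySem

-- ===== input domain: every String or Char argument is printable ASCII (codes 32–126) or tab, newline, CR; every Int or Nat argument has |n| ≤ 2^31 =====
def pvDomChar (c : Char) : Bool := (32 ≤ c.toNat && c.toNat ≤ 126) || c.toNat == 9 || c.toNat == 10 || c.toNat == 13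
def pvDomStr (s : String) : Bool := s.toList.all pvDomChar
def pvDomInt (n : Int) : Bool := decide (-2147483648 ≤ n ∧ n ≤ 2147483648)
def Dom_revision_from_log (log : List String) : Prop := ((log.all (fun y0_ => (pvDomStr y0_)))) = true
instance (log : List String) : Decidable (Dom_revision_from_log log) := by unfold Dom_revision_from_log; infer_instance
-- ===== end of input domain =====

-- B changes the traversal: a reverse early-exit scan instead of A's forward accumulate-last loop; same parsing and exception.

-- shared parsing of a matching line: l.split(":", 1)[1].strip()
def pvParseRev (l : String) : String :=
  PySem.Str.strip ((PySem.List.pyGet? ((PySem.Str.splitMax? l ":" 1).getD []) 1).getD "")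

-- ===== PORT A =====
-- forward loop, `revid` overwritten on each match; `none` at the end is where Python raises (excluded by Pre_)
def revision_from_log (log : List String) : String :=
  match log.foldl
      (fun acc l => if PySem.Str.startswith l "BUILD COMMIT REVISION: " then some (pvParseRev l) else acc)
      none with
  | some r => r
  | none => ""  -- Python raises MissingRevisionInfo here; outside Pre_

-- ===== PORT B =====
-- recursion over the reversed list, returning at the first match
def pvAltGo : List String → String
  | [] => ""  -- Python raises MissingRevisionInfo here; outside Pre_
  | l :: rest =>
      if PySem.Str.startswith l "BUILD COMMIT REVISION: " then pvParseRev l else pvAltGo rest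

def revision_from_log_alt (log : List String) : String :=
  pvAltGo log.reverse

-- ===== PRECONDITION & SPEC =====
-- Pre_ excludes exactly the logs with no matching line, on which Python A (and B) raise MissingRevisionInfo.
def Pre_revision_from_log (log : List String) : Prop :=
  (log.any (fun l => PySem.Str.startswith l "BUILD COMMIT REVISION: ")) = true
instance (log : List String) : Decidable (Pre_revision_from_log log) := by
  unfold Pre_revision_from_log; infer_instance

def pvWitness_revision_from_log : List String :=
  ["hello", "BUILD COMMIT REVISION: abc123 ", "bye"]

def Spec_revision_from_log (log : List String) (out : String) : Prop := out = revision_from_log_alt log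
instance (log : List String) (out : String) : Decidable (Spec_revision_from_log log out) := by
  unfold Spec_revision_from_log; infer_instance

-- ===== CLAIM (what is proved, stated in full; the proofs are below) =====
def Claim_equal_revision_from_log : Prop := ∀ (log : List String), Dom_revision_from_log log → Pre_revision_from_log log → Spec_revision_from_log log (revision_from_log log)

-- ===== LEMMAS AND PROOFS =====
-- A's foldl that keeps the LAST match equals the FIRST match of the reversed list.
theorem pv_foldl_last_match (log : List String) (acc : Option String) :
    log.foldl
      (fun acc l => if PySem.Str.startswith l "BUILD COMMIT REVISION: " then some (pvParseRev l) else acc)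
      acc
    = match log.reverse.find? (fun l => PySem.Str.startswith l "BUILD COMMIT REVISION: ") with
      | some l => some (pvParseRev l)
      | none => acc := by
  induction log generalizing acc with
  | nil => simp
  | cons x xs ih =>
      simp only [List.foldl_cons, ih, List.reverse_cons, List.find?_append]
      cases h : xs.reverse.find? (fun l => PySem.Str.startswith l "BUILD COMMIT REVISION: ") with
      | some l => simp
      | none =>
          simp only [Option.none_or]
          by_cases hx : PySem.Str.startswith x "BUILD COMMIT REVISION: " = true
          · rw [List.find?_cons_of_pos (p := fun l => PySem.Str.startswith l "BUILD COMMIT REVISION: ") hx, if_pos hx]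
          · rw [List.find?_cons_of_neg (p := fun l => PySem.Str.startswith l "BUILD COMMIT REVISION: ") hx, if_neg hx]
            simp

-- B's reverse scan computes the first match of its argument.
theorem pv_altGo_find (rl : List String) :
    pvAltGo rl
    = match rl.find? (fun l => PySem.Str.startswith l "BUILD COMMIT REVISION: ") with
      | some l => pvParseRev l
      | none => "" := by
  induction rl with
  | nil => simp [pvAltGo]
  | cons x xs ih =>
      by_cases hx : PySem.Str.startswith x "BUILD COMMIT REVISION: " = true
      · unfold pvAltGo
        rw [if_pos hx, List.find?_cons_of_pos (p := fun l => PySem.Str.startswith l "BUILD COMMIT REVISION: ") hx]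
      · unfold pvAltGo
        rw [if_neg hx, List.find?_cons_of_neg (p := fun l => PySem.Str.startswith l "BUILD COMMIT REVISION: ") hx, ih]

-- ===== VERDICT (by name: the statement is the Claim_ definition above) =====
theorem revision_from_log_spec : Claim_equal_revision_from_log := by
  intro log _hdom _hpre
  unfold Spec_revision_from_log revision_from_log revision_from_log_alt
  rw [pv_foldl_last_match, pv_altGo_find]
  cases h : log.reverse.find? (fun l => PySem.Str.startswith l "BUILD COMMIT REVISION: ") <;> simp
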